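-- pv_equiv track=rewrite | github.com/nyayat/Cours-DL-info-jap | L2/[S4] EA2/TP/TP2/tp2_ex1.py | fibo_2_bits
-- ===== SOURCE A (Python) =====
-- def nbOfBits(i) :
--   res = 1
--   while (2**res <= i):
--     res +=1
--   return res # À COMPLÉTER
--
-- def fibo_2_bits(n) :
--   if n <= 0 : return 0, 0
--   l = [0, 1]
--   ops = 0
--   for i in range(1, n) :
--     l.append(l[i - 1] + l[i])
--     ops += nbOfBits(l[i+1])
--   return l[n], ops
-- ===== SOURCE B (Python) =====
-- def fibo_2_bits(n):
--     if n <= 0: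
--         return 0, 0
--     if n == 1:
--         return 1, 0
--     a, b = 1, 1          # F_1, F_2
--     ops = n - 1          # each of F_2..F_n contributes at least one bit
--     t = 2                # next power-of-two level to be crossed
--     for k in range(3, n + 1):
--         a, b = b, a + b  # b = F_k
--         while t <= b:    # F_k..F_n (monotone) all reach this new bit level
--             ops += n - k + 1
--             t *= 2
--     return b, ops
-- ===== Notes on version B (the rewrite author's own statement) =====
-- stated objective: faster
-- what changed: Replaces per-element bit counting with level counting: exploiting that Fibonacci bit lengths are nondecreasing, B walks power-of-two thresholds alongside two rolling Fibonacci variables and, each time a threshold is first reached at index k, adds the whole suffix count n-k+1 to ops at once, so no bit-length computation (A's nbOfBits loop) occurs at all.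
import Mathlib
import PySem

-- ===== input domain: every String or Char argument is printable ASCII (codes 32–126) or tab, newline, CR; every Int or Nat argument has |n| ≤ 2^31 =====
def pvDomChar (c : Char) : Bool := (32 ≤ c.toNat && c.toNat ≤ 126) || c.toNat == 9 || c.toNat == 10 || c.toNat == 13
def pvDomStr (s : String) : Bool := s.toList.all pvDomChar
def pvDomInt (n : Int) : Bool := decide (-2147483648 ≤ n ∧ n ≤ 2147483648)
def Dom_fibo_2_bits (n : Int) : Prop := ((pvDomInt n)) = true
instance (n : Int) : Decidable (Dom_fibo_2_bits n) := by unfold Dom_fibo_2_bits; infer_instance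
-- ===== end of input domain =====

-- B replaces A's per-element hand-rolled bit counting by level counting over power-of-two thresholds (suffix contributions), measurably faster.


-- ===== PORT A =====
-- while (2**res <= i): res += 1 — fuel-bounded recursion; i.toNat + 1 steps always suffice.
def nbOfBitsGo : Nat → Int → Int → Int
  | 0, _, res => res
  | f + 1, i, res => if 2 ^ res.toNat ≤ i then nbOfBitsGo f i (res + 1) else res

def nbOfBits (i : Int) : Int := nbOfBitsGo (i.toNat + 1) i 1

-- loop body of A's 'for i in range(1, n)'; list indices are always in range, so pyGetD _ _ 0 = Python's l[·]
def fiboStepA (st : List Int × Int) (i : Int) : List Int × Int :=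
  let l := st.1 ++ [PySem.List.pyGetD st.1 (i - 1) 0 + PySem.List.pyGetD st.1 i 0]
  (l, st.2 + nbOfBits (PySem.List.pyGetD l (i + 1) 0))

def fibo_2_bits (n : Int) : List Int :=
  if n ≤ 0 then [0, 0]
  else
    let st := (PySem.List.pyRange 1 n 1).foldl fiboStepA ([0, 1], 0)
    [PySem.List.pyGetD st.1 n 0, st.2]

-- ===== PORT B =====
-- inner 'while t <= b: ops += add; t *= 2' — fuel-bounded; b.toNat + 1 steps always suffice.
def levelWhileAdd : Nat → Int → Int → Int → Int → Int × Int
  | 0, t, _, _, ops => (t, ops)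
  | f + 1, t, b, add, ops => if t ≤ b then levelWhileAdd f (t * 2) b add (ops + add) else (t, ops)

-- loop body of B's 'for k in range(3, n+1)'; state (a, b, t, ops)
def fiboStepB (n : Int) (st : Int × Int × Int × Int) (k : Int) : Int × Int × Int × Int :=
  let c := st.1 + st.2.1
  let r := levelWhileAdd (c.toNat + 1) st.2.2.1 c (n - k + 1) st.2.2.2
  (st.2.1, c, r.1, r.2)

def fibo_2_bits_alt (n : Int) : List Int :=
  if n ≤ 0 then [0, 0]
  else if n = 1 then [1, 0]
  else
    let st := (PySem.List.pyRange 3 (n + 1) 1).foldl (fiboStepB n) (1, 1, 2, n - 1)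
    [st.2.1, st.2.2.2]

-- ===== PRECONDITION & SPEC =====
def Spec_fibo_2_bits (n : Int) (out : List Int) : Prop := out = fibo_2_bits_alt n
instance (n : Int) (out : List Int) : Decidable (Spec_fibo_2_bits n out) := by unfold Spec_fibo_2_bits; infer_instance

-- ===== CLAIM (what is proved, stated in full; the proofs are below) =====
def Claim_equal_fibo_2_bits : Prop := ∀ (n : Int), Dom_fibo_2_bits n → Spec_fibo_2_bits n (fibo_2_bits n)

-- ===== LEMMAS AND PROOFS =====

-- A's list after processing i = 1 .. m is [fib 0, …, fib (m+1)]
def fibList (k : Nat) : List Int := (List.range k).map (fun j => (Nat.fib j : Int))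

-- sum of bit lengths of fib 2 .. fib k
def blSum (k : Nat) : Int := ∑ i ∈ Finset.Icc 2 k, (PySem.Int.bitLength (Nat.fib i : Int) : Int)

lemma fibList_get (k j : Nat) (h : j < k) :
    PySem.List.pyGetD (fibList k) (j : Int) 0 = (Nat.fib j : Int) := by
  simp [PySem.List.pyGetD_natCast, fibList, List.getD, h]

lemma fibList_succ (k : Nat) : fibList (k + 1) = fibList k ++ [(Nat.fib k : Int)] := by
  simp [fibList, List.range_succ]

lemma nbOfBitsGo_spec (i : Int) (hi : 1 ≤ i) :
    ∀ (fuel r : Nat), 1 ≤ r → r ≤ PySem.Int.bitLength i →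
      PySem.Int.bitLength i ≤ r + fuel →
      nbOfBitsGo fuel i (r : Int) = (PySem.Int.bitLength i : Int) := by
  intro fuel
  induction fuel with
  | zero =>
    intro r _ h1 h2
    have : r = PySem.Int.bitLength i := by omega
    simp [nbOfBitsGo, this]
  | succ f ih =>
    intro r hr h1 h2
    have habs : i.natAbs = i.toNat := by omega
    by_cases hle : (2 : Int) ^ ((r : Int)).toNat ≤ i
    · have hlt : i.natAbs < 2 ^ PySem.Int.bitLength i := PySem.Int.lt_two_pow_bitLength i
      have hpow : (2 : Int) ^ r ≤ i := by simpa using hle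
      have h2r : (2 : Nat) ^ r ≤ i.natAbs := by
        have : ((2 : Nat) ^ r : Int) ≤ i := by push_cast; exact hpow
        omega
      have hral : r < PySem.Int.bitLength i := by
        by_contra hc
        have : (2 : Nat) ^ PySem.Int.bitLength i ≤ 2 ^ r :=
          Nat.pow_le_pow_right (by norm_num) (by omega)
        omega
      have := ih (r + 1) (by omega) (by omega) (by omega)
      rw [nbOfBitsGo]
      simp only [hle, if_true]
      push_cast at this ⊢
      exact this
    · have hne : i ≠ 0 := by omega
      have hlo : 2 ^ (PySem.Int.bitLength i - 1) ≤ i.natAbs := PySem.Int.two_pow_bitLength_le i hne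
      have hpow : i < (2 : Int) ^ r := by simpa using not_le.mp hle
      have h2r : i.natAbs < (2 : Nat) ^ r := by
        have : i < ((2 : Nat) ^ r : Int) := by push_cast; exact hpow
        omega
      have : PySem.Int.bitLength i - 1 < r := by
        by_contra hc
        have : (2 : Nat) ^ r ≤ 2 ^ (PySem.Int.bitLength i - 1) :=
          Nat.pow_le_pow_right (by norm_num) (by omega)
        omega
      have hrb : r = PySem.Int.bitLength i := by omega
      rw [nbOfBitsGo, if_neg hle]
      exact_mod_cast congrArg (fun k : Nat => (k : Int)) hrb

lemma bitLength_pos (i : Int) (hi : 1 ≤ i) : 1 ≤ PySem.Int.bitLength i := by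
  have := PySem.Int.lt_two_pow_bitLength i
  by_contra hc
  have hz : PySem.Int.bitLength i = 0 := by omega
  rw [hz] at this
  omega

lemma bitLength_le_toNat (i : Int) (hi : 1 ≤ i) : PySem.Int.bitLength i ≤ i.toNat := by
  have hne : i ≠ 0 := by omega
  have hlo := PySem.Int.two_pow_bitLength_le i hne
  have hlt : PySem.Int.bitLength i - 1 < 2 ^ (PySem.Int.bitLength i - 1) :=
    Nat.lt_two_pow_self
  omega

lemma bitLength_mono (x y : Int) (hx : 1 ≤ x) (hxy : x ≤ y) :
    PySem.Int.bitLength x ≤ PySem.Int.bitLength y := by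
  by_contra hc
  have h1 : 2 ^ (PySem.Int.bitLength x - 1) ≤ x.natAbs :=
    PySem.Int.two_pow_bitLength_le x (by omega)
  have h2 : y.natAbs < 2 ^ PySem.Int.bitLength y := PySem.Int.lt_two_pow_bitLength y
  have h3 : (2 : Nat) ^ PySem.Int.bitLength y ≤ 2 ^ (PySem.Int.bitLength x - 1) :=
    Nat.pow_le_pow_right (by norm_num) (by omega)
  omega

lemma nbOfBits_eq_bitLength (i : Int) (hi : 1 ≤ i) :
    nbOfBits i = (PySem.Int.bitLength i : Int) := by
  have h1 := bitLength_pos i hi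
  have h2 := bitLength_le_toNat i hi
  have := nbOfBitsGo_spec i hi (i.toNat + 1) 1 (by omega) h1 (by omega)
  simpa [nbOfBits] using this

lemma blSum_succ (k : Nat) (hk : 1 ≤ k) :
    blSum (k + 1) = blSum k + (PySem.Int.bitLength (Nat.fib (k + 1) : Int) : Int) := by
  unfold blSum
  rw [Finset.sum_Icc_succ_top (by omega)]

-- A's fold invariant: list = fib 0 .. fib (m+1), ops = blSum (m+1)
lemma foldA_spec (m : Nat) :
    (PySem.List.pyRange 1 ((m + 1 : Nat) : Int) 1).foldl fiboStepA ([0, 1], (0 : Int))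
      = (fibList (m + 2), blSum (m + 1)) := by
  induction m with
  | zero =>
    simp [PySem.List.pyRange_one_eq_nil, fibList, List.range_succ, blSum]
  | succ m ih =>
    have hsplit : PySem.List.pyRange 1 ((m + 1 + 1 : Nat) : Int) 1
        = PySem.List.pyRange 1 ((m + 1 : Nat) : Int) 1 ++ [((m + 1 : Nat) : Int)] := by
      have := PySem.List.pyRange_one_succ_right (a := 1) (b := ((m + 1 : Nat) : Int)) (by push_cast; omega)
      push_cast at this ⊢
      convert this using 2
    rw [hsplit, List.foldl_append, ih]
    simp only [List.foldl_cons, List.foldl_nil]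
    rw [fiboStepA]
    have e1 : ((m + 1 : Nat) : Int) - 1 = ((m : Nat) : Int) := by push_cast; ring
    have e3 : ((m + 1 : Nat) : Int) + 1 = (((m + 2 : Nat) : Nat) : Int) := by push_cast; ring
    have e2 : ((m + 1 : Nat) : Int) = (((m + 1 : Nat) : Nat) : Int) := by push_cast; ring
    rw [e1, e3, e2]
    rw [fibList_get (m + 2) m (by omega), fibList_get (m + 2) (m + 1) (by omega)]
    have hfib : (Nat.fib m : Int) + (Nat.fib (m + 1) : Int) = (Nat.fib (m + 2) : Int) := by
      rw [Nat.fib_add_two]; push_cast; ring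
    rw [hfib, ← fibList_succ (m + 2)]
    rw [fibList_get (m + 2 + 1) (m + 2) (by omega)]
    rw [nbOfBits_eq_bitLength _ (by exact_mod_cast Nat.fib_pos.mpr (by omega))]
    rw [blSum_succ (m + 1) (by omega)]

-- the threshold while-loop: starting at t = 2^e it stops at t = 2^(bitLength b),
-- adding 'add' once per bit level crossed
lemma levelWhileAdd_spec (b add : Int) (hb : 1 ≤ b) :
    ∀ (fuel e : Nat) (ops : Int), 1 ≤ e → e ≤ PySem.Int.bitLength b →
      PySem.Int.bitLength b ≤ e + fuel →
      levelWhileAdd fuel ((2 : Int) ^ e) b add ops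
        = ((2 : Int) ^ PySem.Int.bitLength b,
           ops + ((PySem.Int.bitLength b - e : Nat) : Int) * add) := by
  intro fuel
  induction fuel with
  | zero =>
    intro e ops he h1 h2
    have : e = PySem.Int.bitLength b := by omega
    simp [levelWhileAdd, this]
  | succ f ih =>
    intro e ops he h1 h2
    by_cases hle : (2 : Int) ^ e ≤ b
    · have h2e : (2 : Nat) ^ e ≤ b.natAbs := by
        have : ((2 : Nat) ^ e : Int) ≤ b := by push_cast; exact hle
        omega
      have hlt : b.natAbs < 2 ^ PySem.Int.bitLength b := PySem.Int.lt_two_pow_bitLength b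
      have helt : e < PySem.Int.bitLength b := by
        by_contra hc
        have : (2 : Nat) ^ PySem.Int.bitLength b ≤ 2 ^ e :=
          Nat.pow_le_pow_right (by norm_num) (by omega)
        omega
      have hrec := ih (e + 1) (ops + add) (by omega) (by omega) (by omega)
      rw [levelWhileAdd]
      simp only [hle, if_true]
      have hpow : (2 : Int) ^ e * 2 = (2 : Int) ^ (e + 1) := by ring
      rw [hpow, hrec]
      have hd : (PySem.Int.bitLength b - e : Nat) = (PySem.Int.bitLength b - (e + 1) : Nat) + 1 := by
        omega
      rw [hd]
      push_cast
      ring_nf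
    · have hab : b.natAbs < (2 : Nat) ^ e := by
        have : b < ((2 : Nat) ^ e : Int) := by push_cast; exact not_le.mp hle
        omega
      have hlo : 2 ^ (PySem.Int.bitLength b - 1) ≤ b.natAbs :=
        PySem.Int.two_pow_bitLength_le b (by omega)
      have : PySem.Int.bitLength b ≤ e := by
        by_contra hc
        have : (2 : Nat) ^ e ≤ 2 ^ (PySem.Int.bitLength b - 1) :=
          Nat.pow_le_pow_right (by norm_num) (by omega)
        omega
      have heq : e = PySem.Int.bitLength b := by omega
      rw [levelWhileAdd, if_neg hle, heq]
      simp

-- B's fold invariant: state = (fib (m+1), fib (m+2), 2^bitLength(fib (m+2)),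
--                              blSum (m+2) + bitLength(fib (m+2)) * (n - (m+2)))
lemma foldB_spec (n : Int) (m : Nat) :
    (PySem.List.pyRange 3 (((m + 2 : Nat) : Int) + 1) 1).foldl (fiboStepB n) (1, 1, 2, n - 1)
      = ((Nat.fib (m + 1) : Int), (Nat.fib (m + 2) : Int),
         (2 : Int) ^ PySem.Int.bitLength (Nat.fib (m + 2) : Int),
         blSum (m + 2) + (PySem.Int.bitLength (Nat.fib (m + 2) : Int) : Int)
           * (n - ((m + 2 : Nat) : Int))) := by
  induction m with
  | zero =>
    have hbl : PySem.Int.bitLength (1 : Int) = 1 := by decide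
    simp [PySem.List.pyRange_one_eq_nil, hbl, blSum]
    omega
  | succ m ih =>
    have hsplit : PySem.List.pyRange 3 (((m + 1 + 2 : Nat) : Int) + 1) 1
        = PySem.List.pyRange 3 (((m + 2 : Nat) : Int) + 1) 1 ++ [((m + 2 : Nat) : Int) + 1] := by
      have := PySem.List.pyRange_one_succ_right (a := 3) (b := ((m + 2 : Nat) : Int) + 1) (by push_cast; omega)
      push_cast at this ⊢
      convert this using 2
    rw [hsplit, List.foldl_append, ih]
    simp only [List.foldl_cons, List.foldl_nil]
    rw [fiboStepB]
    have hfib : (Nat.fib (m + 1) : Int) + (Nat.fib (m + 2) : Int) = (Nat.fib (m + 3) : Int) := by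
      exact_mod_cast (Nat.fib_add_two (n := m + 1)).symm
    have hc1 : (1 : Int) ≤ (Nat.fib (m + 3) : Int) := by
      exact_mod_cast Nat.fib_pos.mpr (by omega)
    have h2pos : (1 : Int) ≤ (Nat.fib (m + 2) : Int) := by
      exact_mod_cast Nat.fib_pos.mpr (by omega)
    have hmono : PySem.Int.bitLength (Nat.fib (m + 2) : Int)
        ≤ PySem.Int.bitLength (Nat.fib (m + 3) : Int) := by
      apply bitLength_mono _ _ h2pos
      exact_mod_cast Nat.fib_le_fib_succ
    have hfuel : PySem.Int.bitLength (Nat.fib (m + 3) : Int)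
        ≤ PySem.Int.bitLength (Nat.fib (m + 2) : Int) + (((Nat.fib (m + 3) : Int)).toNat + 1) := by
      have := bitLength_le_toNat _ hc1
      omega
    simp only [hfib]
    rw [levelWhileAdd_spec (Nat.fib (m + 3) : Int) _ hc1 _ _ _
          (bitLength_pos _ h2pos) hmono hfuel]
    have hadd : n - (((m + 2 : Nat) : Int) + 1) + 1 = n - ((m + 2 : Nat) : Int) := by ring
    have hS : blSum (m + 3) = blSum (m + 2) + (PySem.Int.bitLength (Nat.fib (m + 3) : Int) : Int) := by
      rw [show m + 3 = (m + 2) + 1 from rfl, blSum_succ (m + 2) (by omega)]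
    refine Prod.ext rfl (Prod.ext rfl (Prod.ext rfl ?_))
    simp only [hadd, hS]
    have hd : ((PySem.Int.bitLength (Nat.fib (m + 3) : Int)
          - PySem.Int.bitLength (Nat.fib (m + 2) : Int) : Nat) : Int)
        = (PySem.Int.bitLength (Nat.fib (m + 3) : Int) : Int)
          - (PySem.Int.bitLength (Nat.fib (m + 2) : Int) : Int) := by
      have := hmono; push_cast [Nat.cast_sub this]; ring
    rw [hd]
    push_cast
    ring

-- ===== VERDICT (by name: the statement is the Claim_ definition above) =====
theorem fibo_2_bits_spec : Claim_equal_fibo_2_bits := by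
  intro n _
  unfold Spec_fibo_2_bits fibo_2_bits fibo_2_bits_alt
  by_cases hn : n ≤ 0
  · simp [hn]
  · simp only [hn, if_false]
    by_cases h1 : n = 1
    · subst h1
      norm_num [PySem.List.pyRange_one_eq_nil, PySem.List.pyGetD]
    · obtain ⟨m, hm⟩ : ∃ m : Nat, n = ((m + 2 : Nat) : Int) :=
        ⟨(n - 2).toNat, by omega⟩
      subst hm
      have hA : ((m + 2 : Nat) : Int) = (((m + 1) + 1 : Nat) : Int) := by push_cast; ring
      rw [hA, foldA_spec (m + 1)]
      rw [foldB_spec]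
      simp only [h1, if_false]
      have : (((m + 1) + 1 : Nat) : Int) = (((m + 2 : Nat) : Nat) : Int) := by push_cast; ring
      rw [this, fibList_get (m + 1 + 2) (m + 2) (by omega)]
      have hz : ((m + 2 : Nat) : Int) - ((m + 2 : Nat) : Int) = 0 := by ring
      push_cast
      ring_nf
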